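-- pv_equiv track=rewrite | github.com/sabaimran/classify-articulate | typographical/generate_data.py | get_comma_samples
-- ===== SOURCE A (Python) =====
-- from typing import List
--
-- def get_comma_samples(base_sentences: List[str], target_count=60):
--     """
--     Select negative and positive samples from the base sentences that contain commas.
--     """
--     negative_sentences = []
--     positive_sentences = []
--
--     for s in base_sentences:
--         if "," in s:
--             positive_sentences.append(s)
--         else:
--             negative_sentences.append(s)
--
--         if len(negative_sentences) >= target_count and len(positive_sentences) >= target_count:
--             break
--
--     return negative_sentences[:target_count], positive_sentences[:target_count]
-- ===== SOURCE B (Python) =====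
-- from typing import List
--
-- def get_comma_samples(base_sentences: List[str], target_count=60):
--     """
--     Select negative and positive samples from the base sentences that contain commas.
--     """
--     negatives = [s for s in base_sentences if "," not in s][:target_count]
--     positives = [s for s in base_sentences if "," in s][:target_count]
--     return negatives, positives
-- ===== Notes on version B (the rewrite author's own statement) =====
-- stated objective: simpler
-- what changed: Replaces the single early-exit partition loop over mutable accumulators by two independent filter comprehensions each sliced to target_count, relying on the final slice to make the early exit irrelevant.
-- outside the precondition, e.g. on get_comma_samples(['a', 'b'], -1): A returns ([], []), B returns (['a'], [])
import Mathlib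
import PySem

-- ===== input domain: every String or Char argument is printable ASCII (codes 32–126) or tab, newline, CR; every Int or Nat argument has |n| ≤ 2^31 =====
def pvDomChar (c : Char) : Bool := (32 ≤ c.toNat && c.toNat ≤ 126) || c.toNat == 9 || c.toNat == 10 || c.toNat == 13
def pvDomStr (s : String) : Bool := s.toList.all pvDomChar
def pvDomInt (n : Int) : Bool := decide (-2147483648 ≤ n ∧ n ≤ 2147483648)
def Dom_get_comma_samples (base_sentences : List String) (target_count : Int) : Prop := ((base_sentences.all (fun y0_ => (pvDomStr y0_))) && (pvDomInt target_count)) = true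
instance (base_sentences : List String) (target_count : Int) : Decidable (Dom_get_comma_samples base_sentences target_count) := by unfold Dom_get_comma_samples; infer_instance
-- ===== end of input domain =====

-- B replaces A's single early-exit partition loop by two independent filter passes, each
-- sliced to target_count (simpler; the final slice makes A's early exit irrelevant).
-- B replaces A's single early-exit partition loop by two independent filter passes, each sliced
-- to target_count (simpler; the final slice makes A's early exit irrelevant).


-- ===== PORT A =====
-- A's loop: append s to one of the two accumulators, break once both have ≥ target_count elements.
def getCommaLoop (t : Int) : List String → List String → List String → List String × List String
  | [], neg, pos => (neg, pos)
  | s :: rest, neg, pos =>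
    let neg' := if PySem.Str.isIn "," s then neg else neg ++ [s]
    let pos' := if PySem.Str.isIn "," s then pos ++ [s] else pos
    if t ≤ (neg'.length : Int) ∧ t ≤ (pos'.length : Int) then (neg', pos')
    else getCommaLoop t rest neg' pos'

def get_comma_samples (base_sentences : List String) (target_count : Int) : List String × List String :=
  (PySem.List.slice (getCommaLoop target_count base_sentences [] []).1 none (some target_count),
   PySem.List.slice (getCommaLoop target_count base_sentences [] []).2 none (some target_count))

-- ===== PORT B =====
def get_comma_samples_alt (base_sentences : List String) (target_count : Int) : List String × List String :=
  (PySem.List.slice (base_sentences.filter (fun s => !(PySem.Str.isIn "," s))) none (some target_count),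
   PySem.List.slice (base_sentences.filter (fun s => PySem.Str.isIn "," s)) none (some target_count))

-- ===== PRECONDITION & SPEC =====
-- Pre_ excludes negative target_count, a degenerate count outside the function's natural domain,
-- where the interplay of A's early break with Python's negative slicing and B's plain negative
-- slicing are both accidental truncations no caller would specify.
def Pre_get_comma_samples (base_sentences : List String) (target_count : Int) : Prop :=
  0 ≤ target_count
instance (base_sentences : List String) (target_count : Int) : Decidable (Pre_get_comma_samples base_sentences target_count) := by unfold Pre_get_comma_samples; infer_instance
def pvWitness_get_comma_samples : List String × Int := (["a,b", "c"], 1)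

def Spec_get_comma_samples (base_sentences : List String) (target_count : Int) (out : List String × List String) : Prop := out = get_comma_samples_alt base_sentences target_count
instance (base_sentences : List String) (target_count : Int) (out : List String × List String) : Decidable (Spec_get_comma_samples base_sentences target_count out) := by unfold Spec_get_comma_samples; infer_instance

-- ===== CLAIM (what is proved, stated in full; the proofs are below) =====
def Claim_equal_get_comma_samples : Prop := ∀ (base_sentences : List String) (target_count : Int), Dom_get_comma_samples base_sentences target_count → Pre_get_comma_samples base_sentences target_count → Spec_get_comma_samples base_sentences target_count (get_comma_samples base_sentences target_count)

-- ===== LEMMAS AND PROOFS =====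

-- Invariant of A's loop: however (and whenever) it stops, the first target_count elements of each
-- accumulator equal the first target_count elements of the corresponding fully-filtered list.
theorem getCommaLoop_take (t : Int) (l : List String) :
    ∀ (neg pos : List String),
      (getCommaLoop t l neg pos).1.take t.toNat
        = (neg ++ l.filter (fun s => !(PySem.Str.isIn "," s))).take t.toNat
      ∧ (getCommaLoop t l neg pos).2.take t.toNat
        = (pos ++ l.filter (fun s => PySem.Str.isIn "," s)).take t.toNat := by
  induction l with
  | nil => intro neg pos; simp [getCommaLoop]
  | cons s rest ih =>
    intro neg pos
    simp only [getCommaLoop, List.filter_cons]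
    cases hc : PySem.Str.isIn "," s <;>
      simp only [hc, Bool.not_true, Bool.not_false, Bool.false_eq_true, if_true, if_false] <;>
      split
    -- no comma in s, loop breaks here
    · rename_i hb
      refine ⟨?_, ?_⟩
      · conv_rhs => rw [show neg ++ s :: List.filter (fun s => !PySem.Str.isIn "," s) rest
              = (neg ++ [s]) ++ List.filter (fun s => !PySem.Str.isIn "," s) rest from by simp]
        exact (List.take_append_of_le_length (by simp at hb ⊢; omega)).symm
      · rw [List.take_append_of_le_length (by omega)]
    -- no comma in s, loop continues
    · have h := ih (neg ++ [s]) pos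
      refine ⟨?_, h.2⟩
      rw [h.1]; simp
    -- comma in s, loop breaks here
    · rename_i hb
      refine ⟨?_, ?_⟩
      · rw [List.take_append_of_le_length (by omega)]
      · conv_rhs => rw [show pos ++ s :: List.filter (fun s => PySem.Str.isIn "," s) rest
              = (pos ++ [s]) ++ List.filter (fun s => PySem.Str.isIn "," s) rest from by simp]
        exact (List.take_append_of_le_length (by simp at hb ⊢; omega)).symm
    -- comma in s, loop continues
    · have h := ih neg (pos ++ [s])
      refine ⟨h.1, ?_⟩
      rw [h.2]; simp

-- ===== VERDICT (by name: the statement is the Claim_ definition above) =====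
theorem get_comma_samples_spec : Claim_equal_get_comma_samples := by
  intro bs t _ ht
  have h := getCommaLoop_take t bs [] []
  simp only [List.nil_append] at h
  unfold Spec_get_comma_samples get_comma_samples get_comma_samples_alt
  rw [PySem.List.slice_to _ ht, PySem.List.slice_to _ ht,
      PySem.List.slice_to _ ht, PySem.List.slice_to _ ht]
  exact Prod.ext h.1 h.2
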